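-- pv_equiv track=rewrite | github.com/nlkishore/repo-consolidated | Python/OpenRewrite/modules/python/openRewrite/cp1252-utf8-migration/convert_cp1252_to_utf8.py | build_xml_regions
-- ===== SOURCE A (Python) =====
-- from typing import Iterator, List, Optional, Sequence, Tuple
--
-- def build_xml_regions(text: str) -> List[str]:
--     """<!-- --> = comment; double/single quoted spans = literal (heuristic for attributes)."""
--     n = len(text)
--     r = ["code"] * n
--     i = 0
--     while i < n:
--         if i + 3 < n and text[i : i + 4] == "<!--":
--             end = text.find("-->", i)
--             if end < 0:
--                 while i < n:
--                     r[i] = "comment"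
--                     i += 1
--                 break
--             while i < end + 3:
--                 r[i] = "comment"
--                 i += 1
--             continue
--         i += 1
--     in_quote: Optional[str] = None
--     i = 0
--     while i < n:
--         if r[i] == "comment":
--             i += 1
--             continue
--         ch = text[i]
--         if in_quote:
--             r[i] = "literal"
--             if ch == in_quote:
--                 in_quote = None
--         else:
--             if ch in '"\'':
--                 in_quote = ch
--                 r[i] = "literal"
--         i += 1
--     return r
-- ===== SOURCE B (Python) =====
-- from typing import List, Optional
--
-- def build_xml_regions(text: str) -> List[str]:
--     """Single left-to-right scan: comment spans are consumed whole (quote state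
--     preserved across them), otherwise the quote heuristic labels the char."""
--     n = len(text)
--     r: List[str] = []
--     in_quote: Optional[str] = None
--     i = 0
--     while i < n:
--         if text[i : i + 4] == "<!--":
--             end = text.find("-->", i)
--             stop = n if end < 0 else end + 3
--             r.extend(["comment"] * (stop - i))
--             i = stop
--             continue
--         ch = text[i]
--         if in_quote:
--             r.append("literal")
--             if ch == in_quote:
--                 in_quote = None
--         elif ch in '"\'':
--             in_quote = ch
--             r.append("literal")
--         else:
--             r.append("code")
--         i += 1
--     return r
-- ===== Notes on version B (the rewrite author's own statement) =====
-- stated objective: simpler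
-- what changed: Replaces A's two sequential passes over a pre-filled mutable array (mark comments, then re-scan for quotes skipping comment cells) by one left-to-right scan that consumes each comment span whole and otherwise applies the quote heuristic, appending labels as it goes.
import Mathlib
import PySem

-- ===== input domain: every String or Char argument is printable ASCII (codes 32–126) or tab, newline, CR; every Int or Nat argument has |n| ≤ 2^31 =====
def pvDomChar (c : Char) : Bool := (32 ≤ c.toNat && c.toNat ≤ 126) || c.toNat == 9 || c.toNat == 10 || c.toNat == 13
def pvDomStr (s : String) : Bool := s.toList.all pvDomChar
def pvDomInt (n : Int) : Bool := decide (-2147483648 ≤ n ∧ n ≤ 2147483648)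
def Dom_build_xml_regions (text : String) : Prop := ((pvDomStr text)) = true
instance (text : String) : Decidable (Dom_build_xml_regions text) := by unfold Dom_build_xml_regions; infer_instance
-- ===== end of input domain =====

-- B replaces A's two sequential passes (mark comments in a pre-filled mutable array,
-- then re-scan for quoted literals skipping comment cells) by ONE left-to-right scan
-- that consumes each comment span whole and otherwise applies the quote heuristic;
-- objective: simpler (one pass, no pre-filled array).

-- facts about str.find("-->", i) needed by the ports' termination (used in decreasing_by)
theorem pvFindFacts (cs : List Char) (i : Nat) (hi : i ≤ cs.length)
    (h : ¬ PySem.Chars.findFrom cs ['-','-','>'] (i : Int) none < 0) :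
    i ≤ (PySem.Chars.findFrom cs ['-','-','>'] (i : Int) none).toNat ∧
      (PySem.Chars.findFrom cs ['-','-','>'] (i : Int) none).toNat + 3 ≤ cs.length := by
  have hne : PySem.Chars.findFrom cs ['-','-','>'] (i : Int) none ≠ -1 := by omega
  obtain ⟨h1, h2, -⟩ := PySem.Chars.findFrom_natCast_spec cs ['-','-','>'] i hi hne
  have hl := h2.length_le
  simp [List.length_drop] at hl
  omega

-- ===== PORT A =====
-- inner 'while i < stop: r[i] = "comment"; i += 1' loops of pass 1
def pvMarkComment (r : List String) (i stop : Nat) : List String :=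
  if i < stop then pvMarkComment (r.set i "comment") (i + 1) stop else r
termination_by stop - i

-- first while loop of A: mark comment regions
def pvPass1 (cs : List Char) (r : List String) (i : Nat) : List String :=
  if hlt : i < cs.length then
    if i + 3 < cs.length ∧
        PySem.List.slice cs (some (i : Int)) (some ((i : Int) + 4)) = ['<','!','-','-'] then
      -- end = text.find("-->", i)
      if hneg : PySem.Chars.findFrom cs ['-','-','>'] (i : Int) none < 0 then
        pvMarkComment r i cs.length            -- end < 0: mark to the end, then break
      else
        pvPass1 cs
          (pvMarkComment r i ((PySem.Chars.findFrom cs ['-','-','>'] (i : Int) none).toNat + 3))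
          ((PySem.Chars.findFrom cs ['-','-','>'] (i : Int) none).toNat + 3)
    else pvPass1 cs r (i + 1)
  else r
termination_by cs.length - i
decreasing_by
  · have := pvFindFacts cs i (by omega) hneg; omega
  · omega

-- second while loop of A: quote heuristic over the non-comment cells
def pvPass2 (cs : List Char) (r : List String) (q : Option Char) (i : Nat) : List String :=
  if i < cs.length then
    if r.getD i "" = "comment" then pvPass2 cs r q (i + 1)
    else
      match q with
      | some qc =>
        pvPass2 cs (r.set i "literal") (if cs.getD i ' ' = qc then none else some qc) (i + 1)
      | none =>
        if cs.getD i ' ' = '"' ∨ cs.getD i ' ' = '\'' then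
          pvPass2 cs (r.set i "literal") (some (cs.getD i ' ')) (i + 1)
        else pvPass2 cs r none (i + 1)
  else r
termination_by cs.length - i

def build_xml_regions (text : String) : List String :=
  let cs := text.toList
  pvPass2 cs (pvPass1 cs (List.replicate cs.length "code") 0) none 0

-- ===== PORT B =====
-- single scan of Source B: r grows by append/extend, in_quote preserved across comment spans
def pvBLoop (cs : List Char) (r : List String) (q : Option Char) (i : Nat) : List String :=
  if hlt : i < cs.length then
    if PySem.List.slice cs (some (i : Int)) (some ((i : Int) + 4)) = ['<','!','-','-'] then
      -- end = text.find("-->", i); stop = n if end < 0 else end + 3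
      if hneg : PySem.Chars.findFrom cs ['-','-','>'] (i : Int) none < 0 then
        pvBLoop cs (r ++ List.replicate (cs.length - i) "comment") q cs.length
      else
        pvBLoop cs
          (r ++ List.replicate ((PySem.Chars.findFrom cs ['-','-','>'] (i : Int) none).toNat + 3 - i) "comment")
          q ((PySem.Chars.findFrom cs ['-','-','>'] (i : Int) none).toNat + 3)
    else
      match q with
      | some qc =>
        pvBLoop cs (r ++ ["literal"]) (if cs.getD i ' ' = qc then none else some qc) (i + 1)
      | none =>
        if cs.getD i ' ' = '"' ∨ cs.getD i ' ' = '\'' then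
          pvBLoop cs (r ++ ["literal"]) (some (cs.getD i ' ')) (i + 1)
        else pvBLoop cs (r ++ ["code"]) none (i + 1)
  else r
termination_by cs.length - i
decreasing_by
  · omega
  · have := pvFindFacts cs i (by omega) hneg; omega
  · omega
  · omega
  · omega

def build_xml_regions_alt (text : String) : List String :=
  pvBLoop text.toList [] none 0

-- ===== PRECONDITION & SPEC =====
def Spec_build_xml_regions (text : String) (out : List String) : Prop := out = build_xml_regions_alt text
instance (text : String) (out : List String) : Decidable (Spec_build_xml_regions text out) := by unfold Spec_build_xml_regions; infer_instance

-- ===== CLAIM (what is proved, stated in full; the proofs are below) =====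
def Claim_equal_build_xml_regions : Prop := ∀ (text : String), Dom_build_xml_regions text → Spec_build_xml_regions text (build_xml_regions text)

-- ===== LEMMAS AND PROOFS =====

-- where the comment starting at i stops (exclusive): n if '-->' is absent, else end+3
def pvStop (cs : List Char) (i : Nat) : Nat :=
  if PySem.Chars.findFrom cs ['-','-','>'] (i : Int) none < 0 then cs.length
  else (PySem.Chars.findFrom cs ['-','-','>'] (i : Int) none).toNat + 3

theorem pvStop_gt (cs : List Char) (i : Nat) (hi : i < cs.length) :
    i < pvStop cs i ∧ pvStop cs i ≤ cs.length := by
  unfold pvStop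
  split
  · omega
  · rename_i h; have := pvFindFacts cs i (by omega) h; omega

-- the labels pass 1 produces for the suffix starting at i
def pvFlags (cs : List Char) (i : Nat) : List String :=
  if hlt : i < cs.length then
    if i + 3 < cs.length ∧
        PySem.List.slice cs (some (i : Int)) (some ((i : Int) + 4)) = ['<','!','-','-'] then
      List.replicate (pvStop cs i - i) "comment" ++ pvFlags cs (pvStop cs i)
    else "code" :: pvFlags cs (i + 1)
  else []
termination_by cs.length - i
decreasing_by
  · have := pvStop_gt cs i hlt; omega
  · omega

theorem pvFlags_length (cs : List Char) (i : Nat) : (pvFlags cs i).length = cs.length - i := by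
  fun_induction pvFlags cs i with
  | case1 i hlt hcmt ih =>
    have := pvStop_gt cs i hlt
    simp [ih]
    omega
  | case2 i hlt hcmt ih => simp [ih]; omega
  | case3 i hlt => simp; omega

-- pass 2 as a structural scan over (label, char) pairs
def pvScan2 : List (String × Char) → Option Char → List String
  | [], _ => []
  | (s, ch) :: rest, q =>
    if s = "comment" then s :: pvScan2 rest q
    else
      match q with
      | some qc => "literal" :: pvScan2 rest (if ch = qc then none else some qc)
      | none =>
        if ch = '"' ∨ ch = '\'' then "literal" :: pvScan2 rest (some ch)
        else s :: pvScan2 rest none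

-- B's scan without the accumulator
def pvBCons (cs : List Char) (q : Option Char) (i : Nat) : List String :=
  if hlt : i < cs.length then
    if PySem.List.slice cs (some (i : Int)) (some ((i : Int) + 4)) = ['<','!','-','-'] then
      List.replicate (pvStop cs i - i) "comment" ++ pvBCons cs q (pvStop cs i)
    else
      match q with
      | some qc => "literal" :: pvBCons cs (if cs.getD i ' ' = qc then none else some qc) (i + 1)
      | none =>
        if cs.getD i ' ' = '"' ∨ cs.getD i ' ' = '\'' then
          "literal" :: pvBCons cs (some (cs.getD i ' ')) (i + 1)
        else "code" :: pvBCons cs none (i + 1)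
  else []
termination_by cs.length - i
decreasing_by
  · have := pvStop_gt cs i hlt; omega
  · omega
  · omega
  · omega

-- the slice guard, in drop/take form
theorem pvSlice_eq (cs : List Char) (i : Nat) :
    PySem.List.slice cs (some (i : Int)) (some ((i : Int) + 4)) = (cs.drop i).take 4 := by
  have h4 : ((i : Int) + 4) = ((i + 4 : Nat) : Int) := by push_cast; ring
  rw [h4, PySem.List.slice_natCast]
  congr 1
  omega

theorem pvGuard_len (cs : List Char) (i : Nat)
    (h : PySem.List.slice cs (some (i : Int)) (some ((i : Int) + 4)) = ['<','!','-','-']) :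
    i + 3 < cs.length := by
  rw [pvSlice_eq] at h
  have := congrArg List.length h
  simp at this
  omega

-- generic take/drop/set helpers
theorem pvDropAppend (X Y : List String) (m : Nat) (h : X.length = m) :
    List.drop m (X ++ Y) = Y := by
  subst h; exact List.drop_left

theorem pvTakeAppend (X Y : List String) (m : Nat) (h : X.length = m) :
    List.take m (X ++ Y) = X := by
  subst h; exact List.take_left

theorem pvTake_succ (r : List String) (i : Nat) (h : i < r.length) :
    r.take (i + 1) = r.take i ++ [r[i]] := by
  rw [List.take_add_one, List.getElem?_eq_getElem h]
  rfl

theorem pvSet_take_succ (r : List String) (i : Nat) (v : String) (h : i < r.length) :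
    (r.set i v).take (i + 1) = r.take i ++ [v] := by
  apply List.ext_getElem
  · simp; omega
  · intro j h1 h2
    simp only [List.length_take, List.length_set] at h1
    simp only [List.getElem_take, List.getElem_set]
    rcases Nat.lt_or_ge j i with hj | hj
    · rw [List.getElem_append_left (by simp; omega)]
      rw [if_neg (by omega)]
      simp
    · have hji : j = i := by omega
      subst hji
      rw [if_pos rfl]
      rw [List.getElem_append_right (by simp)]
      simp
theorem pvSet_drop_le (r : List String) (i : Nat) (v : String) (m : Nat) (h : i < m) :
    (r.set i v).drop m = r.drop m := by
  apply List.ext_getElem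
  · simp
  · intro j h1 h2
    simp only [List.getElem_drop, List.getElem_set]
    rw [if_neg (by omega)]

theorem pvGetD_getElem (r : List Char) (i : Nat) (d : Char) (h : i < r.length) :
    r.getD i d = r[i] := by
  simp [List.getD, List.getElem?_eq_getElem h]

theorem pvDrop_cons (r : List Char) (i : Nat) (h : i < r.length) :
    r.drop i = r[i] :: r.drop (i + 1) := by
  rw [List.drop_eq_getElem_cons h]

theorem pvDropS_cons (r : List String) (i : Nat) (h : i < r.length) :
    r.drop i = r[i] :: r.drop (i + 1) := by
  rw [List.drop_eq_getElem_cons h]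

theorem pvMark_len (r : List String) (i stop : Nat) :
    (pvMarkComment r i stop).length = r.length := by
  fun_induction pvMarkComment r i stop with
  | _ => simp_all

theorem pvMark_eq (r : List String) (i stop : Nat) (h1 : i ≤ stop) (h2 : stop ≤ r.length) :
    pvMarkComment r i stop = r.take i ++ List.replicate (stop - i) "comment" ++ r.drop stop := by
  suffices H : ∀ (k : Nat) (r : List String) (i stop : Nat), stop - i ≤ k → i ≤ stop →
      stop ≤ r.length →
      pvMarkComment r i stop = r.take i ++ List.replicate (stop - i) "comment" ++ r.drop stop from
    H stop r i stop (by omega) h1 h2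
  intro k
  induction k with
  | zero =>
    intro r i stop hk hx1 hx2
    have hst : stop = i := by omega
    subst hst
    rw [pvMarkComment.eq_def, if_neg (by omega)]
    simp
  | succ m ih =>
    intro r i stop hk hx1 hx2
    rw [pvMarkComment.eq_def]
    by_cases h : i < stop
    · rw [if_pos h]
      rw [ih (r.set i "comment") (i + 1) stop (by omega) (by omega) (by simpa using hx2)]
      have hi : i < r.length := by omega
      rw [pvSet_take_succ r i "comment" hi, pvSet_drop_le r i "comment" stop h]
      rw [show stop - i = (stop - (i + 1)) + 1 from by omega, List.replicate_succ]
      simp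
    · rw [if_neg h]
      have hst : stop = i := by omega
      subst hst
      simp

-- pass 1 produces take i ++ pvFlags i when the suffix of r is still all "code"
theorem pvPass1_eq (cs : List Char) (r : List String) (i : Nat)
    (hlen : r.length = cs.length)
    (hsuf : r.drop i = List.replicate (cs.length - i) "code") :
    pvPass1 cs r i = r.take i ++ pvFlags cs i := by
  fun_induction pvPass1 cs r i with
  | case1 r i hlt hcmt hneg =>
    rw [pvFlags.eq_def, dif_pos hlt, if_pos hcmt]
    have hstop : pvStop cs i = cs.length := by unfold pvStop; rw [if_pos hneg]
    rw [hstop, pvFlags.eq_def, dif_neg (show ¬ cs.length < cs.length from by omega)]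
    rw [pvMark_eq r i cs.length (by omega) (by omega)]
    rw [List.drop_of_length_le (show r.length ≤ cs.length from by omega)]
    simp
  | case2 r i hlt hcmt hneg ih =>
    set e3 := (PySem.Chars.findFrom cs ['-','-','>'] (i : Int) none).toNat + 3 with he3
    have hstop : pvStop cs i = e3 := by unfold pvStop; rw [if_neg hneg]
    have hf := pvFindFacts cs i (by omega) hneg
    have hb1 : i ≤ e3 := by omega
    have hb2 : e3 ≤ cs.length := by omega
    have hm := pvMark_eq r i e3 hb1 (by omega)
    have hXlen : (List.take i r ++ List.replicate (e3 - i) "comment").length = e3 := by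
      simp; omega
    have hlen2 : (pvMarkComment r i e3).length = cs.length := by rw [pvMark_len]; exact hlen
    have hdrop3 : List.drop e3 (pvMarkComment r i e3) = List.replicate (cs.length - e3) "code" := by
      rw [hm, pvDropAppend _ _ e3 hXlen]
      have hdd : List.drop e3 r = List.drop (e3 - i) (List.drop i r) := by
        rw [List.drop_drop]; congr 1; omega
      rw [hdd, hsuf, List.drop_replicate]
      congr 1; omega
    rw [ih hlen2 hdrop3]
    conv_rhs => rw [pvFlags.eq_def]
    rw [dif_pos hlt, if_pos hcmt, hstop]
    rw [hm, pvTakeAppend _ _ e3 hXlen]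
    simp [List.append_assoc]
  | case3 r i hlt hcmt ih =>
    have hi : i < r.length := by omega
    have h0 := pvDropS_cons r i hi
    rw [hsuf] at h0
    rw [show cs.length - i = (cs.length - (i + 1)) + 1 from by omega, List.replicate_succ] at h0
    injection h0 with ha hb
    have hri : r[i] = "code" := ha.symm
    have hsuf' : r.drop (i + 1) = List.replicate (cs.length - (i + 1)) "code" := hb.symm
    rw [pvFlags.eq_def, dif_pos hlt, if_neg hcmt]
    rw [ih hlen hsuf']
    rw [pvTake_succ r i hi, hri]
    simp
  | case4 r i hlt =>
    rw [pvFlags.eq_def, dif_neg hlt]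
    rw [List.take_of_length_le (show r.length ≤ i from by omega)]
    simp

-- pass 2 equals the structural scan on the remaining (label, char) pairs
theorem pvPass2_eq (cs : List Char) (r : List String) (q : Option Char) (i : Nat)
    (hlen : r.length = cs.length) :
    pvPass2 cs r q i = r.take i ++ pvScan2 ((r.drop i).zip (cs.drop i)) q := by
  suffices H : ∀ (k : Nat) (r : List String) (q : Option Char) (i : Nat),
      cs.length - i ≤ k → r.length = cs.length →
      pvPass2 cs r q i = r.take i ++ pvScan2 ((r.drop i).zip (cs.drop i)) q from
    H cs.length r q i (by omega) hlen
  intro k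
  induction k with
  | zero =>
    intro r q i hk hlen
    rw [pvPass2.eq_def, if_neg (by omega)]
    rw [List.take_of_length_le (show r.length ≤ i from by omega),
      List.drop_of_length_le (show r.length ≤ i from by omega)]
    simp [pvScan2]
  | succ m ih =>
    intro r q i hk hlen
    by_cases hlt : i < cs.length
    · have hir : i < r.length := by omega
      rw [pvPass2.eq_def, if_pos hlt]
      by_cases hc : r.getD i "" = "comment"
      · rw [if_pos hc]
        have hri : r[i] = "comment" := by rwa [List.getD_eq_getElem r "" hir] at hc
        rw [ih r q (i + 1) (by omega) hlen]
        rw [pvDropS_cons r i hir, pvDrop_cons cs i hlt]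
        simp only [List.zip_cons_cons, pvScan2]
        rw [if_pos hri, pvTake_succ r i hir, hri]
        simp
      · rw [if_neg hc]
        have hri : ¬ r[i] = "comment" := by rwa [List.getD_eq_getElem r "" hir] at hc
        have hch : cs.getD i ' ' = cs[i] := pvGetD_getElem cs i ' ' hlt
        cases q with
        | some qc =>
          dsimp only
          rw [ih (r.set i "literal") _ (i + 1) (by omega) (by simpa using hlen)]
          rw [pvSet_take_succ r i "literal" hir, pvSet_drop_le r i "literal" (i + 1) (by omega)]
          rw [pvDropS_cons r i hir, pvDrop_cons cs i hlt]
          simp only [List.zip_cons_cons, pvScan2]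
          rw [if_neg hri, hch]
          simp
        | none =>
          dsimp only
          rw [hch]
          by_cases hq : cs[i] = '"' ∨ cs[i] = '\''
          · rw [if_pos hq]
            rw [ih (r.set i "literal") _ (i + 1) (by omega) (by simpa using hlen)]
            rw [pvSet_take_succ r i "literal" hir, pvSet_drop_le r i "literal" (i + 1) (by omega)]
            rw [pvDropS_cons r i hir, pvDrop_cons cs i hlt]
            simp only [List.zip_cons_cons, pvScan2]
            rw [if_neg hri, if_pos hq]
            simp
          · rw [if_neg hq]
            rw [ih r _ (i + 1) (by omega) hlen]
            rw [pvDropS_cons r i hir, pvDrop_cons cs i hlt]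
            simp only [List.zip_cons_cons, pvScan2]
            rw [if_neg hri, if_neg hq, pvTake_succ r i hir]
            simp only [List.append_assoc, List.singleton_append]
    · rw [pvPass2.eq_def, if_neg hlt]
      rw [List.take_of_length_le (show r.length ≤ i from by omega),
        List.drop_of_length_le (show r.length ≤ i from by omega)]
      simp [pvScan2]

-- comment prefixes pass through pvScan2 unchanged
theorem pvScan2_comment (k : Nat) (ys : List Char) (rest : List (String × Char)) (q : Option Char)
    (h : ys.length = k) :
    pvScan2 ((List.replicate k "comment").zip ys ++ rest) q =
      List.replicate k "comment" ++ pvScan2 rest q := by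
  induction k generalizing ys q with
  | zero => simp
  | succ m ih =>
    cases ys with
    | nil => simp at h
    | cons y ys' =>
      rw [List.replicate_succ]
      simp only [List.zip_cons_cons, List.cons_append, pvScan2]
      simp only [if_true]
      rw [ih ys' q (by simpa using h)]

-- the scanned pass-1 labels are exactly B's one-pass output
theorem pvScan2_flags (cs : List Char) (i : Nat) (q : Option Char) :
    pvScan2 ((pvFlags cs i).zip (cs.drop i)) q = pvBCons cs q i := by
  suffices H : ∀ (k i : Nat) (q : Option Char), cs.length - i ≤ k →
      pvScan2 ((pvFlags cs i).zip (cs.drop i)) q = pvBCons cs q i from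
    H cs.length i q (by omega)
  intro k
  induction k with
  | zero =>
    intro i q hk
    rw [pvFlags.eq_def, dif_neg (by omega), pvBCons.eq_def, dif_neg (by omega)]
    simp [pvScan2]
  | succ m ih =>
    intro i q hk
    by_cases hlt : i < cs.length
    · by_cases hcmt : PySem.List.slice cs (some (i : Int)) (some ((i : Int) + 4)) = ['<','!','-','-']
      · have hcA : i + 3 < cs.length ∧
            PySem.List.slice cs (some (i : Int)) (some ((i : Int) + 4)) = ['<','!','-','-'] :=
          ⟨pvGuard_len cs i hcmt, hcmt⟩
        rw [pvFlags.eq_def, dif_pos hlt, if_pos hcA, pvBCons.eq_def, dif_pos hlt, if_pos hcmt]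
        have hs := pvStop_gt cs i hlt
        have hsplit : cs.drop i =
            (cs.drop i).take (pvStop cs i - i) ++ cs.drop (pvStop cs i) := by
          have h2 : (cs.drop i).drop (pvStop cs i - i) = cs.drop (pvStop cs i) := by
            rw [List.drop_drop]; congr 1; omega
          rw [← h2, List.take_append_drop]
        rw [hsplit, List.zip_append (by simp; omega)]
        rw [pvScan2_comment (pvStop cs i - i) _ _ q (by simp; omega)]
        rw [ih (pvStop cs i) q (by omega)]
      · have hcA : ¬ (i + 3 < cs.length ∧
            PySem.List.slice cs (some (i : Int)) (some ((i : Int) + 4)) = ['<','!','-','-']) :=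
          fun hand => hcmt hand.2
        rw [pvFlags.eq_def, dif_pos hlt, if_neg hcA, pvBCons.eq_def, dif_pos hlt, if_neg hcmt]
        rw [pvDrop_cons cs i hlt]
        simp only [List.zip_cons_cons, pvScan2]
        rw [if_neg (show ¬ ("code" = "comment") from by decide)]
        rw [pvGetD_getElem cs i ' ' hlt]
        cases q with
        | some qc =>
          dsimp only
          rw [ih (i + 1) _ (by omega)]
        | none =>
          dsimp only
          by_cases hq : cs[i] = '"' ∨ cs[i] = '\''
          · rw [if_pos hq, if_pos hq, ih (i + 1) _ (by omega)]
          · rw [if_neg hq, if_neg hq, ih (i + 1) _ (by omega)]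
    · rw [pvFlags.eq_def, dif_neg hlt, pvBCons.eq_def, dif_neg hlt]
      simp [pvScan2]

-- B's accumulator loop in terms of the accumulator-free scan
theorem pvBLoop_eq (cs : List Char) (r : List String) (q : Option Char) (i : Nat) :
    pvBLoop cs r q i = r ++ pvBCons cs q i := by
  suffices H : ∀ (k : Nat) (r : List String) (q : Option Char) (i : Nat), cs.length - i ≤ k →
      pvBLoop cs r q i = r ++ pvBCons cs q i from H cs.length r q i (by omega)
  intro k
  induction k with
  | zero =>
    intro r q i hk
    rw [pvBLoop.eq_def, dif_neg (by omega), pvBCons.eq_def, dif_neg (by omega)]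
    simp
  | succ m ih =>
    intro r q i hk
    by_cases hlt : i < cs.length
    · rw [pvBLoop.eq_def, dif_pos hlt]
      by_cases hcmt : PySem.List.slice cs (some (i : Int)) (some ((i : Int) + 4)) = ['<','!','-','-']
      · rw [if_pos hcmt]
        by_cases hneg : PySem.Chars.findFrom cs ['-','-','>'] (i : Int) none < 0
        · rw [dif_pos hneg]
          rw [ih _ _ _ (by omega)]
          conv_rhs => rw [pvBCons.eq_def]
          rw [dif_pos hlt, if_pos hcmt]
          have hstop : pvStop cs i = cs.length := by unfold pvStop; rw [if_pos hneg]
          rw [hstop]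
          simp
        · rw [dif_neg hneg]
          rw [ih _ _ _ (by have := pvFindFacts cs i (by omega) hneg; omega)]
          conv_rhs => rw [pvBCons.eq_def]
          rw [dif_pos hlt, if_pos hcmt]
          have hstop : pvStop cs i =
              (PySem.Chars.findFrom cs ['-','-','>'] (i : Int) none).toNat + 3 := by
            unfold pvStop; rw [if_neg hneg]
          rw [hstop]
          simp
      · rw [if_neg hcmt]
        cases q with
        | some qc =>
          dsimp only
          rw [ih _ _ _ (by omega)]
          conv_rhs => rw [pvBCons.eq_def]
          rw [dif_pos hlt, if_neg hcmt]
          dsimp only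
          simp
        | none =>
          by_cases hq : cs.getD i ' ' = '"' ∨ cs.getD i ' ' = '\''
          · dsimp only
            rw [if_pos hq, ih _ _ _ (by omega)]
            conv_rhs => rw [pvBCons.eq_def]
            rw [dif_pos hlt, if_neg hcmt]
            dsimp only
            rw [if_pos hq]
            simp
          · dsimp only
            rw [if_neg hq, ih _ _ _ (by omega)]
            conv_rhs => rw [pvBCons.eq_def]
            rw [dif_pos hlt, if_neg hcmt]
            dsimp only
            rw [if_neg hq]
            simp
    · rw [pvBLoop.eq_def, dif_neg hlt, pvBCons.eq_def, dif_neg hlt]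
      simp

-- ===== VERDICT (by name: the statement is the Claim_ definition above) =====
theorem build_xml_regions_spec : Claim_equal_build_xml_regions := by
  intro text _
  unfold Spec_build_xml_regions build_xml_regions build_xml_regions_alt
  dsimp only
  rw [pvPass1_eq text.toList (List.replicate text.toList.length "code") 0 (by simp) (by simp)]
  simp only [List.take_zero, List.nil_append]
  rw [pvPass2_eq text.toList _ none 0 (by simp [pvFlags_length])]
  rw [pvBLoop_eq]
  rw [← pvScan2_flags text.toList 0 none]
  simp
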